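-- pv_equiv track=rewrite | github.com/t1ooo/geeksforgeeks | count-number-of-bits-to-be-flipped-to-convert-a-to-b/main.py | countBitsFlipV3
-- ===== SOURCE A (Python) =====
-- def countBitsFlipV3(a, b):
--     def countSetBits(n):
--         count = 0
--         while n > 0:
--             if n % 2 == 1:
--                 count += 1
--             n = n // 2
--         return count
--
--     xor = a ^ b
--     return countSetBits(xor)
-- ===== SOURCE B (Python) =====
-- def countBitsFlipV3(a, b):
--     n = a ^ b
--     count = 0
--     while n > 0:
--         n &= n - 1
--         count += 1
--     return count
-- ===== Notes on version B (the rewrite author's own statement) =====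
-- stated objective: alternative
-- what changed: Replaces the per-bit-position scan (test n % 2, halve n) with Brian Kernighan's algorithm that clears the lowest set bit via n &= n - 1 once per set bit; the while n > 0 guard keeps the behaviour on non-positive xor (returns 0) identical to A.
import Mathlib
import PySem

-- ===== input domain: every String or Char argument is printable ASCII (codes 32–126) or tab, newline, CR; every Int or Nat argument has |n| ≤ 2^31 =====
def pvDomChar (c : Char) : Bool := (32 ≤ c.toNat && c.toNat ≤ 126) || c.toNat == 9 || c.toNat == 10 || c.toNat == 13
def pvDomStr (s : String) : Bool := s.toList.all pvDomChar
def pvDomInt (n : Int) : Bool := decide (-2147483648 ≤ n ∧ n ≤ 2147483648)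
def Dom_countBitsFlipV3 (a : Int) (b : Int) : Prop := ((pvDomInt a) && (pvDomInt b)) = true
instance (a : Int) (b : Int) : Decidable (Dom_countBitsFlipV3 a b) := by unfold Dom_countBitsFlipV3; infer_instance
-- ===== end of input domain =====

-- B replaces A's per-bit-position scan with Brian Kernighan's clear-lowest-set-bit loop (alternative algorithm, same results).

-- ===== PORT A =====
-- the inner while loop of countSetBits: count accumulates, n is halved each iteration
def pyCountSetBits (n : Int) (count : Int) : Int :=
  if h : 0 < n then
    pyCountSetBits (PySem.Int.floordiv n 2)
      (if PySem.Int.mod n 2 = 1 then count + 1 else count)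
  else count
  termination_by n.toNat
  decreasing_by
    rw [PySem.Int.floordiv_eq_ediv_of_pos (by omega : (0:Int) < 2)]
    omega

def countBitsFlipV3 (a : Int) (b : Int) : Int :=
  pyCountSetBits (PySem.Int.bxor a b) 0

-- ===== PORT B =====
-- B's while loop: clear the lowest set bit (n &= n - 1) once per set bit
def kernLoop (n : Int) (count : Int) : Int :=
  if h : 0 < n then
    kernLoop (PySem.Int.band n (n - 1)) (count + 1)
  else count
  termination_by n.toNat
  decreasing_by
    rw [PySem.Int.band_of_nonneg (by omega) (by omega)]
    have := Nat.and_le_right (n := n.toNat) (m := (n - 1).toNat)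
    omega

def countBitsFlipV3_alt (a : Int) (b : Int) : Int :=
  kernLoop (PySem.Int.bxor a b) 0

-- ===== PRECONDITION & SPEC =====
def Spec_countBitsFlipV3 (a : Int) (b : Int) (out : Int) : Prop := out = countBitsFlipV3_alt a b
instance (a : Int) (b : Int) (out : Int) : Decidable (Spec_countBitsFlipV3 a b out) := by unfold Spec_countBitsFlipV3; infer_instance

-- ===== CLAIM (what is proved, stated in full; the proofs are below) =====
def Claim_equal_countBitsFlipV3 : Prop := ∀ (a : Int) (b : Int), Dom_countBitsFlipV3 a b → Spec_countBitsFlipV3 a b (countBitsFlipV3 a b)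

-- ===== LEMMAS AND PROOFS =====

-- reference count of set bits of a natural number
def natBits : Nat → Nat
  | 0 => 0
  | (m+1) => natBits ((m+1)/2) + (m+1) % 2
  termination_by m => m
  decreasing_by omega

theorem natBits_eq (m : Nat) : natBits m = natBits (m/2) + m % 2 := by
  cases m with
  | zero => simp [natBits]
  | succ k => rw [natBits]

-- m odd: m &&& (m-1) = m-1
theorem land_pred_odd (m : Nat) (hm : m % 2 = 1) : m &&& (m - 1) = m - 1 := by
  apply Nat.eq_of_testBit_eq
  intro i
  cases i with
  | zero =>
    rw [Nat.testBit_land]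
    simp only [Nat.testBit_zero]
    have h2 : (m - 1) % 2 = 0 := by omega
    simp [hm, h2]
  | succ i =>
    rw [Nat.testBit_land]
    simp only [Nat.testBit_succ]
    rw [show (m - 1) / 2 = m / 2 by omega, Bool.and_self]

-- m even positive: (2k) &&& (2k-1) = 2 * (k &&& (k-1))
theorem land_pred_even (k : Nat) (hk : 0 < k) :
    (2 * k) &&& (2 * k - 1) = 2 * (k &&& (k - 1)) := by
  apply Nat.eq_of_testBit_eq
  intro i
  cases i with
  | zero =>
    rw [Nat.testBit_land]
    simp only [Nat.testBit_zero]
    have h1 : (2 * k) % 2 = 0 := by omega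
    have h2 : (2 * (k &&& (k - 1))) % 2 = 0 := by omega
    simp [h1, h2]
  | succ i =>
    rw [Nat.testBit_land]
    simp only [Nat.testBit_succ]
    have h1 : (2 * k) / 2 = k := by omega
    have h2 : (2 * k - 1) / 2 = k - 1 := by omega
    have h3 : (2 * (k &&& (k - 1))) / 2 = k &&& (k - 1) := by omega
    rw [h1, h2, h3, Nat.testBit_land]

-- clearing the lowest set bit decrements the set-bit count
theorem natBits_land_pred (m : Nat) (h : 0 < m) :
    natBits (m &&& (m - 1)) + 1 = natBits m := by
  induction m using Nat.strong_induction_on with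
  | _ m ih =>
    rcases Nat.even_or_odd m with he | ho
    · -- even case
      obtain ⟨k, hk⟩ := he
      have hkpos : 0 < k := by omega
      have hm2 : m = 2 * k := by omega
      subst hm2
      rw [land_pred_even k hkpos]
      have e1 : natBits (2 * (k &&& (k - 1))) = natBits (k &&& (k - 1)) := by
        rw [natBits_eq (2 * (k &&& (k - 1)))]
        have : (2 * (k &&& (k - 1))) / 2 = k &&& (k - 1) := by omega
        rw [this]; omega
      have e2 : natBits (2 * k) = natBits k := by
        rw [natBits_eq (2 * k)]
        have : (2 * k) / 2 = k := by omega
        rw [this]; omega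
      rw [e1, e2]
      exact ih k (by omega) hkpos
    · -- odd case: no induction needed
      have hm : m % 2 = 1 := Nat.odd_iff.mp ho
      rw [land_pred_odd m hm]
      rw [natBits_eq (m - 1), natBits_eq m]
      have h1 : (m - 1) / 2 = m / 2 := by omega
      have h2 : (m - 1) % 2 = 0 := by omega
      rw [h1]; omega

theorem pyCountSetBits_eq_natBits :
    ∀ (k : Nat) (n c : Int), n.toNat = k → pyCountSetBits n c = c + natBits n.toNat := by
  intro k
  induction k using Nat.strong_induction_on with
  | _ k ih =>
    intro n c hk
    rw [pyCountSetBits]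
    split_ifs with h hb
    · -- 0 < n, n % 2 = 1
      have hf : PySem.Int.floordiv n 2 = n / 2 := PySem.Int.floordiv_eq_ediv_of_pos (by omega)
      have hm : PySem.Int.mod n 2 = n % 2 := PySem.Int.mod_eq_emod_of_pos (by omega)
      rw [hf]
      rw [ih (n / 2).toNat (by omega) (n / 2) (c + 1) rfl]
      rw [hm] at hb
      have h2 : (n / 2).toNat = n.toNat / 2 := by omega
      have h3 : n.toNat % 2 = 1 := by omega
      rw [h2, natBits_eq n.toNat, h3]
      push_cast
      ring
    · -- 0 < n, n % 2 ≠ 1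
      have hf : PySem.Int.floordiv n 2 = n / 2 := PySem.Int.floordiv_eq_ediv_of_pos (by omega)
      have hm : PySem.Int.mod n 2 = n % 2 := PySem.Int.mod_eq_emod_of_pos (by omega)
      rw [hf]
      rw [ih (n / 2).toNat (by omega) (n / 2) c rfl]
      rw [hm] at hb
      have h2 : (n / 2).toNat = n.toNat / 2 := by omega
      have h3 : n.toNat % 2 = 0 := by omega
      rw [h2, natBits_eq n.toNat, h3]
      push_cast
      ring
    · -- n ≤ 0
      have : n.toNat = 0 := by omega
      rw [this]
      simp [natBits]

theorem kernLoop_eq_natBits :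
    ∀ (k : Nat) (n c : Int), n.toNat = k → kernLoop n c = c + natBits n.toNat := by
  intro k
  induction k using Nat.strong_induction_on with
  | _ k ih =>
    intro n c hk
    rw [kernLoop]
    split_ifs with h
    · have hb : PySem.Int.band n (n - 1) = ((n.toNat &&& (n - 1).toNat : Nat) : Int) :=
        PySem.Int.band_of_nonneg (by omega) (by omega)
      have hle : n.toNat &&& (n - 1).toNat ≤ (n - 1).toNat := Nat.and_le_right
      rw [hb]
      rw [ih ((n.toNat &&& (n - 1).toNat : Nat) : Int).toNat (by omega) _ (c + 1) rfl]
      have ht : (((n.toNat &&& (n - 1).toNat : Nat) : Int)).toNat = n.toNat &&& (n - 1).toNat := by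
        omega
      rw [ht]
      have hpred : (n - 1).toNat = n.toNat - 1 := by omega
      rw [hpred]
      have := natBits_land_pred n.toNat (by omega)
      omega
    · have : n.toNat = 0 := by omega
      rw [this]
      simp [natBits]

-- ===== VERDICT (by name: the statement is the Claim_ definition above) =====
theorem countBitsFlipV3_spec : Claim_equal_countBitsFlipV3 := by
  intro a b _
  unfold Spec_countBitsFlipV3 countBitsFlipV3 countBitsFlipV3_alt
  rw [pyCountSetBits_eq_natBits (PySem.Int.bxor a b).toNat _ 0 rfl,
    kernLoop_eq_natBits (PySem.Int.bxor a b).toNat _ 0 rfl]
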